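-- pv_equiv track=rewrite | github.com/Ofekst/algorithmim | Targil2.py | add_edge_to_mst_tree
-- ===== SOURCE A (Python) =====
-- def remove_edge_from_mst(mst, edge_to_remove):
--     u, v, w = edge_to_remove
--     new_mst = []
--
--     for edge in mst:
--         a, b, weight = edge
--         if (a == u and b == v and weight == w) or (a == v and b == u and weight == w):
--             continue  # skip the edge we want to remove
--         new_mst.append(edge)
--
--     return new_mst
--
-- def find_cycle_fast(mst, new_edge):
--     graph = {}         # מילון רגיל
--     edge_weights = {}  # מחזיק את המשקלים של הצלעות
--
--     # בניית גרף שכונתי מה-MST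
--     for u, v, w in mst:
--         if u not in graph:
--             graph[u] = []
--         if v not in graph:
--             graph[v] = []
--         graph[u].append(v)
--         graph[v].append(u)
--         edge_weights[(u, v)] = w
--         edge_weights[(v, u)] = w
--
--     u, v, w = new_edge
--     visited = set()
--
--     def dfs(current, target, curr_path):
--         if current == target:
--             return curr_path
--         visited.add(current)
--         for neighbor in graph.get(current, []):
--             if neighbor not in visited:
--                 result = dfs(neighbor, target, curr_path + [(current, neighbor, edge_weights[(current, neighbor)])])
--                 if result:
--                     return result
--         return None
--
--     cycle_path = dfs(u, v, [])
--     if cycle_path is None: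
--         return []
--
--     cycle_path.append(new_edge)
--     return cycle_path
--
-- def add_edge_to_mst_tree(mst_tree: list, edge):
--     cycle_path = find_cycle_fast(mst_tree, edge)
--
--     if not cycle_path:
--         return mst_tree  # במקרה נדיר שאין מעגל (למרות שצפוי שיהיה) – לא נוגעים
--
--     # מוצא את משקל הצלע הכי גבוהה במעגל
--     max_weight = max(e[2] for e in cycle_path)
--
--     # בודק את כל הצלעות שהן מקסימום
--     max_edges = [e for e in cycle_path if e[2] == max_weight]
--
--     # אם הצלע החדשה היא אחת מהכבדות – אין שיפור, לא מחליפים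
--     if edge in max_edges:
--         return mst_tree
--
--     # בוחר אחת מהכבדות (שהיא לא הצלע החדשה) ומסיר אותה
--     edge_to_remove = next(e for e in max_edges if e != edge)
--     new_mst = remove_edge_from_mst(mst_tree, edge_to_remove)
--     new_mst.append(edge)
--
--     return new_mst
-- ===== SOURCE B (Python) =====
-- def add_edge_to_mst_tree(mst_tree: list, edge):
--     u, v, w = edge
--
--     # adjacency + weight maps in one pass
--     adj = {}
--     wt = {}
--     for a, b, c in mst_tree:
--         adj.setdefault(a, [])
--         adj.setdefault(b, [])
--         adj[a].append(b)
--         adj[b].append(a)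
--         wt[(a, b)] = c
--         wt[(b, a)] = c
--
--     # DFS building the u->v path back-to-front on return (no accumulator threading)
--     visited = set()
--
--     def search(cur):
--         if cur == v:
--             return []
--         visited.add(cur)
--         for nb in adj.get(cur, []):
--             if nb not in visited:
--                 tail = search(nb)
--                 if tail is not None:
--                     return [(cur, nb, wt[(cur, nb)])] + tail
--         return None
--
--     path = search(u)
--     if path is None:
--         return mst_tree  # adding the edge creates no cycle: tree unchanged
--
--     # one-pass scan: first path edge of strictly maximal weight
--     best = None
--     for e in path:
--         if best is None or e[2] > best[2]:
--             best = e
--     if best is None or w >= best[2]: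
--         return mst_tree  # new edge is (one of) the heaviest on the cycle
--
--     bu, bv, bw = best
--     out = [e for e in mst_tree
--            if not ((e[0] == bu and e[1] == bv and e[2] == bw) or
--                    (e[0] == bv and e[1] == bu and e[2] == bw))]
--     out.append(edge)
--     return out
-- ===== Notes on version B (the rewrite author's own statement) =====
-- stated objective: alternative
-- what changed: The recursive accumulator-threading DFS is replaced by a DFS that builds the u-v path back-to-front on return (cons on the way out, no path copying per call), and the max()+filter+next() selection of the cycle edge to drop is replaced by a single strict-max scan over the path followed by one filter comprehension.
import Mathlib
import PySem

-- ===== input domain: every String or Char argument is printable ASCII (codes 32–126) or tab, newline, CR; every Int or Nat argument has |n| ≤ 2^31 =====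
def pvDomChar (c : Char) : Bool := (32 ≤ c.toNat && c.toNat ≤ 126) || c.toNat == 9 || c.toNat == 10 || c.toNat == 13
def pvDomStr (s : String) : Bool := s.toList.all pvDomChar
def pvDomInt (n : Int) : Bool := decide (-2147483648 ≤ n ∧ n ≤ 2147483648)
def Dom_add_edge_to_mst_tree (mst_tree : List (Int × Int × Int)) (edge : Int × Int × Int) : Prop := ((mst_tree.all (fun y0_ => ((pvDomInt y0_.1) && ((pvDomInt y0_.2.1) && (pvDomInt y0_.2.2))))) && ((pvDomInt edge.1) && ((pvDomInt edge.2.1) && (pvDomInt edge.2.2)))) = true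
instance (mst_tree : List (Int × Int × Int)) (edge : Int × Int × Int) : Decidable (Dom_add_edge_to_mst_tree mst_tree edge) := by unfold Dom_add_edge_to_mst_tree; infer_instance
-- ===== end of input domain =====

-- B rebuilds the DFS path back-to-front on return (no accumulator threading) and picks the
-- edge to swap out by a single strict-max scan instead of A's max()+filter+next() stages;
-- objective: alternative (same asymptotic cost).

-- ===== PORT A =====

-- A's remove_edge_from_mst: loop appending every edge that does not match either orientation.
def removeEdgeFromMst (mst : List (Int × Int × Int)) (er : Int × Int × Int) : List (Int × Int × Int) :=
  mst.foldl (fun acc e =>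
    if (e.1 = er.1 ∧ e.2.1 = er.2.1 ∧ e.2.2 = er.2.2) ∨
       (e.1 = er.2.1 ∧ e.2.1 = er.1 ∧ e.2.2 = er.2.2)
    then acc else acc ++ [e]) []

-- A's graph/edge_weights build loop (membership test, insert [], then append; both orientations).
def buildGraphA (mst : List (Int × Int × Int)) :
    PySem.Dict Int (List Int) × PySem.Dict (Int × Int) Int :=
  mst.foldl (fun gw e =>
    let g := if gw.1.contains e.1 then gw.1 else gw.1.insert e.1 []
    let g := if g.contains e.2.1 then g else g.insert e.2.1 []
    let g := g.modify e.1 [] (fun l => l ++ [e.2.1])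
    let g := g.modify e.2.1 [] (fun l => l ++ [e.1])
    let ew := (gw.2.insert (e.1, e.2.1) e.2.2).insert (e.2.1, e.1) e.2.2
    (g, ew)) (PySem.Dict.empty, PySem.Dict.empty)

-- A's recursive dfs threading the shared `visited` set and the growing `curr_path` accumulator.
-- Fuel only makes the recursion structural; each nesting level adds a fresh node to `visited`,
-- so a fuel of (number of nodes + 2) is never exhausted and the guard branch is unreachable.
mutual
def dfsA (g : PySem.Dict Int (List Int)) (ew : PySem.Dict (Int × Int) Int) (target : Int)
    (fuel : Nat) (cur : Int) (cp : List (Int × Int × Int)) (vis : PySem.Set Int) :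
    Option (List (Int × Int × Int)) × PySem.Set Int :=
  match fuel with
  | 0 => (none, vis)
  | fuel + 1 =>
    if cur = target then (some cp, vis)
    else
      let vis' := PySem.Set.add vis cur
      loopA g ew target fuel (g.getD cur []) cur cp vis'
termination_by (fuel, 0)

def loopA (g : PySem.Dict Int (List Int)) (ew : PySem.Dict (Int × Int) Int) (target : Int)
    (fuel : Nat) (ns : List Int) (cur : Int) (cp : List (Int × Int × Int)) (vis : PySem.Set Int) :
    Option (List (Int × Int × Int)) × PySem.Set Int :=
  match ns with
  | [] => (none, vis)
  | n :: rest =>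
    if PySem.Set.contains vis n then loopA g ew target fuel rest cur cp vis
    else
      -- edge_weights[(current, neighbor)]: the key is always present (both orientations are
      -- stored for every mst edge and n comes from cur's adjacency list), so getD's default
      -- is unreachable where Python would raise KeyError.
      match dfsA g ew target fuel n (cp ++ [(cur, n, ew.getD (cur, n) 0)]) vis with
      | (some r, vis') =>
        -- Python's `if result:` -- falsy also for an empty returned path
        if r = [] then loopA g ew target fuel rest cur cp vis' else (some r, vis')
      | (none, vis') => loopA g ew target fuel rest cur cp vis'
termination_by (fuel, ns.length + 1)
end

-- A's find_cycle_fast.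
def findCycleFast (mst : List (Int × Int × Int)) (new_edge : Int × Int × Int) :
    List (Int × Int × Int) :=
  let gw := buildGraphA mst
  match (dfsA gw.1 gw.2 new_edge.2.1 (2 * mst.length + 2) new_edge.1 [] PySem.Set.empty).1 with
  | none => []
  | some p => p ++ [new_edge]

-- Python's max() on a nonempty iterable: first element, then running fold keeping the first maximum.
def pyMaxInt : List Int → Int
  | [] => 0  -- unreachable: the caller is guarded by `if not cycle_path`
  | x :: xs => xs.foldl (fun a b => if b > a then b else a) x

def add_edge_to_mst_tree (mst_tree : List (Int × Int × Int)) (edge : Int × Int × Int) :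
    List (Int × Int × Int) :=
  let cycle_path := findCycleFast mst_tree edge
  if cycle_path = [] then mst_tree
  else
    let max_weight := pyMaxInt (cycle_path.map (fun e => e.2.2))
    let max_edges := cycle_path.filter (fun e => e.2.2 = max_weight)
    if edge ∈ max_edges then mst_tree
    else
      -- next(e for e in max_edges if e != edge); StopIteration is unreachable here
      -- (this branch forces edge.2.2 < max_weight, so every max edge differs from edge)
      match max_edges.find? (fun e => e ≠ edge) with
      | some er => removeEdgeFromMst mst_tree er ++ [edge]
      | none => mst_tree

-- ===== PORT B =====

-- B's build loop: setdefault both endpoints, then append both directions; weights both orientations.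
def buildAdjB (mst : List (Int × Int × Int)) :
    PySem.Dict Int (List Int) × PySem.Dict (Int × Int) Int :=
  mst.foldl (fun gw e =>
    let g := (gw.1.setdefault e.1 []).setdefault e.2.1 []
    let g := g.modify e.1 [] (fun l => l ++ [e.2.1])
    let g := g.modify e.2.1 [] (fun l => l ++ [e.1])
    let ew := (gw.2.insert (e.1, e.2.1) e.2.2).insert (e.2.1, e.1) e.2.2
    (g, ew)) (PySem.Dict.empty, PySem.Dict.empty)

-- B's search: returns the path from cur to the target built back-to-front on return.
-- Same fuel discipline as A's port (the guard is unreachable for the fuel used below).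
mutual
def searchB (g : PySem.Dict Int (List Int)) (ew : PySem.Dict (Int × Int) Int) (target : Int)
    (fuel : Nat) (cur : Int) (vis : PySem.Set Int) :
    Option (List (Int × Int × Int)) × PySem.Set Int :=
  match fuel with
  | 0 => (none, vis)
  | fuel + 1 =>
    if cur = target then (some [], vis)
    else
      let vis' := PySem.Set.add vis cur
      loopB g ew target fuel (g.getD cur []) cur vis'
termination_by (fuel, 0)

def loopB (g : PySem.Dict Int (List Int)) (ew : PySem.Dict (Int × Int) Int) (target : Int)
    (fuel : Nat) (ns : List Int) (cur : Int) (vis : PySem.Set Int) :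
    Option (List (Int × Int × Int)) × PySem.Set Int :=
  match ns with
  | [] => (none, vis)
  | nb :: rest =>
    if PySem.Set.contains vis nb then loopB g ew target fuel rest cur vis
    else
      match searchB g ew target fuel nb vis with
      | (some tail, vis') => (some ((cur, nb, ew.getD (cur, nb) 0) :: tail), vis')
      | (none, vis') => loopB g ew target fuel rest cur vis'
termination_by (fuel, ns.length + 1)
end

def add_edge_to_mst_tree_alt (mst_tree : List (Int × Int × Int)) (edge : Int × Int × Int) :
    List (Int × Int × Int) :=
  let gw := buildAdjB mst_tree
  match (searchB gw.1 gw.2 edge.2.1 (2 * mst_tree.length + 2) edge.1 PySem.Set.empty).1 with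
  | none => mst_tree
  | some path =>
    -- one-pass scan: first path edge of strictly maximal weight
    let best := path.foldl
      (fun b e => match b with
        | none => some e
        | some be => if e.2.2 > be.2.2 then some e else b)
      (none : Option (Int × Int × Int))
    match best with
    | none => mst_tree
    | some be =>
      if edge.2.2 ≥ be.2.2 then mst_tree
      else
        (mst_tree.filter (fun e =>
          !((e.1 == be.1 && e.2.1 == be.2.1 && e.2.2 == be.2.2) ||
            (e.1 == be.2.1 && e.2.1 == be.1 && e.2.2 == be.2.2)))) ++ [edge]

-- ===== PRECONDITION & SPEC =====
def Spec_add_edge_to_mst_tree (mst_tree : List (Int × Int × Int)) (edge : Int × Int × Int) (out : List (Int × Int × Int)) : Prop := out = add_edge_to_mst_tree_alt mst_tree edge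
instance (mst_tree : List (Int × Int × Int)) (edge : Int × Int × Int) (out : List (Int × Int × Int)) : Decidable (Spec_add_edge_to_mst_tree mst_tree edge out) := by unfold Spec_add_edge_to_mst_tree; infer_instance

-- ===== CLAIM (what is proved, stated in full; the proofs are below) =====
def Claim_equal_add_edge_to_mst_tree : Prop := ∀ (mst_tree : List (Int × Int × Int)) (edge : Int × Int × Int), Dom_add_edge_to_mst_tree mst_tree edge → Spec_add_edge_to_mst_tree mst_tree edge (add_edge_to_mst_tree mst_tree edge)

-- ===== LEMMAS AND PROOFS =====

theorem setdefault_eq_ite {ν : Type} (d : PySem.Dict Int ν) (k : Int) (v : ν) :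
    d.setdefault k v = if d.contains k then d else d.insert k v := by
  by_cases h : d.contains k
  · simp [PySem.Dict.setdefault_of_contains d v h, h]
  · simp [PySem.Dict.setdefault_of_not_contains d v (by simpa using h), h]

theorem build_eq (mst : List (Int × Int × Int)) : buildGraphA mst = buildAdjB mst := by
  unfold buildGraphA buildAdjB
  congr 1
  funext gw e
  simp [setdefault_eq_ite]

-- lift the relative path produced by B's search to A's absolute path
def liftPath (cp : List (Int × Int × Int))
    (r : Option (List (Int × Int × Int)) × PySem.Set Int) :
    Option (List (Int × Int × Int)) × PySem.Set Int :=
  (r.1.map (fun q => cp ++ q), r.2)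

theorem sim_loop (g : PySem.Dict Int (List Int)) (ew : PySem.Dict (Int × Int) Int)
    (target : Int) (fuel : Nat)
    (ih : ∀ cur cp vis, dfsA g ew target fuel cur cp vis = liftPath cp (searchB g ew target fuel cur vis)) :
    ∀ (ns : List Int) (cur : Int) (cp : List (Int × Int × Int)) (vis : PySem.Set Int),
      loopA g ew target fuel ns cur cp vis = liftPath cp (loopB g ew target fuel ns cur vis) := by
  intro ns
  induction ns with
  | nil => intro cur cp vis; simp [loopA, loopB, liftPath]
  | cons n rest ihr =>
    intro cur cp vis
    rw [loopA, loopB]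
    by_cases hv : PySem.Set.contains vis n
    · simp only [hv, if_true]; exact ihr cur cp vis
    · simp only [hv, if_false, Bool.false_eq_true]
      rw [ih n (cp ++ [(cur, n, ew.getD (cur, n) 0)]) vis]
      rcases hs : searchB g ew target fuel n vis with ⟨o, vis'⟩
      rcases o with _ | q
      · simp [liftPath]; exact ihr cur cp vis'
      · simp [liftPath]

theorem sim_dfs (g : PySem.Dict Int (List Int)) (ew : PySem.Dict (Int × Int) Int)
    (target : Int) :
    ∀ (fuel : Nat) (cur : Int) (cp : List (Int × Int × Int)) (vis : PySem.Set Int),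
      dfsA g ew target fuel cur cp vis = liftPath cp (searchB g ew target fuel cur vis) := by
  intro fuel
  induction fuel with
  | zero => intro cur cp vis; simp [dfsA, searchB, liftPath]
  | succ f ihf =>
    intro cur cp vis
    rw [dfsA, searchB]
    by_cases ht : cur = target
    · simp [ht, liftPath]
    · simp only [ht, if_false]
      exact sim_loop g ew target f ihf _ _ _ _

-- Python's max() keeps the first maximum; its fold step is `max`
theorem ite_gt_eq_max (a b : Int) : (if b > a then b else a) = max a b := by
  rw [max_def]; split_ifs <;> omega

theorem pyMaxInt_spec (l : List Int) (h : l ≠ []) :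
    pyMaxInt l ∈ l ∧ ∀ x ∈ l, x ≤ pyMaxInt l := by
  rcases l with _ | ⟨x, t⟩
  · exact absurd rfl h
  · have hfold : pyMaxInt (x :: t) = t.foldl max x := by
      have hr : pyMaxInt (x :: t) = t.foldl (fun a b => if b > a then b else a) x := rfl
      rw [hr]
      congr 1
      funext a b
      exact ite_gt_eq_max a b
    have hmax : PySem.List.max? (x :: t) (fun y => y) = some (pyMaxInt (x :: t)) := by
      rw [hfold]; exact PySem.List.max?_id_cons x t
    exact ⟨PySem.List.max?_mem hmax, fun y hy => PySem.List.max?_isMax hmax y hy⟩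

-- the total running "first strict max" of B's scan, seeded with the first element
def fm1 (b : Int × Int × Int) (p : List (Int × Int × Int)) : Int × Int × Int :=
  p.foldl (fun be e => if e.2.2 > be.2.2 then e else be) b

theorem bestStep_some : ∀ (p : List (Int × Int × Int)) (b : Int × Int × Int),
    p.foldl (fun acc e => match acc with
      | none => some e
      | some be => if e.2.2 > be.2.2 then some e else acc) (some b) = some (fm1 b p) := by
  intro p
  induction p with
  | nil => intro b; simp [fm1]
  | cons e t ih =>
    intro b
    simp only [List.foldl_cons, fm1, List.foldl_cons]
    by_cases h : e.2.2 > b.2.2 <;> simp only [h, if_true, if_false] <;> exact ih _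

theorem fm1_spec : ∀ (p : List (Int × Int × Int)) (b : Int × Int × Int),
    fm1 b p ∈ b :: p ∧ (∀ e ∈ b :: p, e.2.2 ≤ (fm1 b p).2.2) ∧
    ((b :: p).filter (fun e => e.2.2 = (fm1 b p).2.2)).head? = some (fm1 b p) := by
  intro p
  induction p with
  | nil => intro b; simp [fm1]
  | cons e t ih =>
    intro b
    have hstep : fm1 b (e :: t) = fm1 (if e.2.2 > b.2.2 then e else b) t := by
      simp [fm1]
    set b' := if e.2.2 > b.2.2 then e else b with hb'
    obtain ⟨hmem, hmax, hhead⟩ := ih b'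
    have hb'w : b.2.2 ≤ b'.2.2 ∧ e.2.2 ≤ b'.2.2 := by
      rw [hb']; by_cases h : e.2.2 > b.2.2 <;> simp [h] <;> omega
    have hM : b.2.2 ≤ (fm1 b (e :: t)).2.2 ∧ e.2.2 ≤ (fm1 b (e :: t)).2.2 := by
      rw [hstep]
      exact ⟨le_trans hb'w.1 (hmax b' (List.mem_cons_self)),
             le_trans hb'w.2 (hmax b' (List.mem_cons_self))⟩
    refine ⟨?_, ?_, ?_⟩
    · rw [hstep]
      rcases List.mem_cons.mp hmem with h | h
      · rw [h, hb']
        by_cases hc : e.2.2 > b.2.2 <;> simp [hc]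
      · simp [List.mem_cons, h]
    · intro x hx
      rcases List.mem_cons.mp hx with h | h
      · rw [h]; exact hM.1
      rcases List.mem_cons.mp h with h2 | h2
      · rw [h2]; exact hM.2
      · rw [hstep]; exact hmax x (List.mem_cons_of_mem _ h2)
    · -- head of the filtered list is the running first-max
      rw [hstep] at hM ⊢
      set m := fm1 b' t with hm
      by_cases hbM : b.2.2 = m.2.2
      · -- b attains the max: b' = b and m = b
        have hb'b : b' = b := by
          rw [hb']
          by_cases hc : e.2.2 > b.2.2
          · exfalso; have := hM.2; omega
          · simp [hc]
        have hmb : m = b := by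
          have hbM' : b'.2.2 = m.2.2 := by rw [hb'b]; exact hbM
          have h2 := hhead
          rw [List.filter_cons, if_pos (by simpa using hbM')] at h2
          simp only [List.head?_cons, Option.some.injEq] at h2
          rw [← h2, hb'b]
        rw [List.filter_cons, if_pos (by simpa using hbM)]
        simp [hmb]
      · -- b is dropped by the filter
        rw [List.filter_cons, if_neg (by simpa using hbM)]
        by_cases heM : e.2.2 = m.2.2
        · -- e attains the max and b does not, so b' = e and m = e
          have he : e.2.2 > b.2.2 := by have h1 := hM.1; omega
          have hb'e : b' = e := by rw [hb']; simp [he]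
          have hmb : m = e := by
            have hbM' : b'.2.2 = m.2.2 := by rw [hb'e]; exact heM
            have h2 := hhead
            rw [List.filter_cons, if_pos (by simpa using hbM')] at h2
            simp only [List.head?_cons, Option.some.injEq] at h2
            rw [← h2, hb'e]
          rw [List.filter_cons, if_pos (by simpa using heM)]
          simp [hmb]
        · -- neither head attains the max: the max is reached inside t
          rw [List.filter_cons, if_neg (by simpa using heM)]
          have hb'M : ¬ b'.2.2 = m.2.2 := by
            rw [hb']; by_cases hc : e.2.2 > b.2.2 <;> simp [hc] <;> assumption
          have := hhead
          rw [List.filter_cons, if_neg (by simpa using hb'M)] at this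
          exact this

theorem remove_eq_filter (mst : List (Int × Int × Int)) (er : Int × Int × Int) :
    removeEdgeFromMst mst er = mst.filter (fun e =>
      !((e.1 == er.1 && e.2.1 == er.2.1 && e.2.2 == er.2.2) ||
        (e.1 == er.2.1 && e.2.1 == er.1 && e.2.2 == er.2.2))) := by
  unfold removeEdgeFromMst
  have hfn : (fun (acc : List (Int × Int × Int)) e =>
      if (e.1 = er.1 ∧ e.2.1 = er.2.1 ∧ e.2.2 = er.2.2) ∨
         (e.1 = er.2.1 ∧ e.2.1 = er.1 ∧ e.2.2 = er.2.2)
      then acc else acc ++ [e]) = (fun acc e =>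
      if (!((e.1 == er.1 && e.2.1 == er.2.1 && e.2.2 == er.2.2) ||
        (e.1 == er.2.1 && e.2.1 == er.1 && e.2.2 == er.2.2))) = true then acc ++ [e] else acc) := by
    funext acc e
    have hb : ((e.1 == er.1 && e.2.1 == er.2.1 && e.2.2 == er.2.2) ||
        (e.1 == er.2.1 && e.2.1 == er.1 && e.2.2 == er.2.2)) =
        decide ((e.1 = er.1 ∧ e.2.1 = er.2.1 ∧ e.2.2 = er.2.2) ∨
         (e.1 = er.2.1 ∧ e.2.1 = er.1 ∧ e.2.2 = er.2.2)) := by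
      simp [Bool.and_assoc, Bool.beq_eq_decide_eq]
    rw [hb]
    by_cases h : (e.1 = er.1 ∧ e.2.1 = er.2.1 ∧ e.2.2 = er.2.2) ∨
         (e.1 = er.2.1 ∧ e.2.1 = er.1 ∧ e.2.2 = er.2.2) <;> simp [h]
  rw [hfn, PySem.List.foldl_append_if _ (fun e => e) mst []]
  simp

-- the post-processing stages agree once the search has produced a nonempty path
theorem post_eq (mst : List (Int × Int × Int)) (edge e0 : Int × Int × Int)
    (t : List (Int × Int × Int)) :
    (if (e0 :: t) ++ [edge] = [] then mst
     else
       if edge ∈ ((e0 :: t) ++ [edge]).filter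
           (fun e => e.2.2 = pyMaxInt (((e0 :: t) ++ [edge]).map (fun e => e.2.2))) then mst
       else
         match (((e0 :: t) ++ [edge]).filter
             (fun e => e.2.2 = pyMaxInt (((e0 :: t) ++ [edge]).map (fun e => e.2.2)))).find?
             (fun e => e ≠ edge) with
         | some er => removeEdgeFromMst mst er ++ [edge]
         | none => mst)
    = (match (e0 :: t).foldl (fun b e => match b with
          | none => some e
          | some be => if e.2.2 > be.2.2 then some e else b)
          (none : Option (Int × Int × Int)) with
       | none => mst
       | some be =>
         if edge.2.2 ≥ be.2.2 then mst
         else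
           (mst.filter (fun e =>
             !((e.1 == be.1 && e.2.1 == be.2.1 && e.2.2 == be.2.2) ||
               (e.1 == be.2.1 && e.2.1 == be.1 && e.2.2 == be.2.2)))) ++ [edge]) := by
  rw [if_neg (show ¬ (e0 :: t) ++ [edge] = [] by simp)]
  have hbest : (e0 :: t).foldl (fun b e => match b with
      | none => some e
      | some be => if e.2.2 > be.2.2 then some e else b)
      (none : Option (Int × Int × Int)) = some (fm1 e0 t) := by
    simpa using bestStep_some t e0
  rw [hbest]
  obtain ⟨hmem, hmax, hhead⟩ := fm1_spec t e0
  obtain ⟨hVmem, hVmax⟩ :=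
    pyMaxInt_spec (((e0 :: t) ++ [edge]).map (fun e => e.2.2)) (by simp)
  obtain ⟨m, hmEq⟩ : ∃ m, fm1 e0 t = m := ⟨_, rfl⟩
  rw [hmEq] at hmem hmax hhead ⊢
  obtain ⟨V, hVEq⟩ : ∃ V, pyMaxInt (((e0 :: t) ++ [edge]).map (fun e => e.2.2)) = V := ⟨_, rfl⟩
  rw [hVEq] at hVmem hVmax ⊢
  change _ = if edge.2.2 ≥ m.2.2 then mst else _
  by_cases hw : edge.2.2 ≥ m.2.2
  · -- the new edge is (one of) the heaviest on the cycle: both keep the tree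
    have hVw : V = edge.2.2 := by
      have h1 : edge.2.2 ≤ V := hVmax _ (by simp)
      have h2 : V ≤ edge.2.2 := by
        rcases List.mem_map.mp hVmem with ⟨x, hx, hxw⟩
        have hxw' : x.2.2 = V := hxw
        rcases List.mem_append.mp hx with hx' | hx'
        · have h3 := hmax x hx'; omega
        · rw [List.mem_singleton] at hx'
          subst hx'
          omega
      omega
    have hmemE : edge ∈ ((e0 :: t) ++ [edge]).filter (fun e => decide (e.2.2 = V)) :=
      List.mem_filter.mpr ⟨by simp, by simp [hVw]⟩
    rw [if_pos hmemE, if_pos hw]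
  · -- the heaviest cycle edge lies on the path: both swap it for the new edge
    have hVM : V = m.2.2 := by
      have h1 : m.2.2 ≤ V :=
        hVmax _ (List.mem_map.mpr ⟨m, List.mem_append_left _ hmem, rfl⟩)
      have h2 : V ≤ m.2.2 := by
        rcases List.mem_map.mp hVmem with ⟨x, hx, hxw⟩
        have hxw' : x.2.2 = V := hxw
        rcases List.mem_append.mp hx with hx' | hx'
        · have h3 := hmax x hx'; omega
        · rw [List.mem_singleton] at hx'
          subst hx'
          omega
      omega
    have hfilter : ((e0 :: t) ++ [edge]).filter (fun e => decide (e.2.2 = V)) =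
        (e0 :: t).filter (fun e => decide (e.2.2 = m.2.2)) := by
      rw [List.filter_append, hVM]
      have hsing : ([edge].filter (fun e => decide (e.2.2 = m.2.2))) = [] := by
        simp; omega
      rw [hsing, List.append_nil]
    have hnmem : edge ∉ ((e0 :: t) ++ [edge]).filter (fun e => decide (e.2.2 = V)) := by
      rw [hfilter]
      intro hmem2
      have h4 := (List.mem_filter.mp hmem2).2
      simp at h4; omega
    rw [if_neg hnmem, hfilter]
    obtain ⟨tl, htl⟩ := List.head?_eq_some_iff.mp hhead
    rw [htl]
    have hfind : List.find? (fun e => decide (e ≠ edge)) (m :: tl) = some m := by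
      apply List.find?_cons_of_pos
      simp only [decide_eq_true_eq]
      intro hcontr
      rw [hcontr] at hw
      exact hw (le_refl _)
    rw [hfind, if_neg hw]
    change removeEdgeFromMst mst m ++ [edge] = _
    rw [remove_eq_filter]

-- ===== VERDICT (by name: the statement is the Claim_ definition above) =====
theorem add_edge_to_mst_tree_spec : Claim_equal_add_edge_to_mst_tree := by
  unfold Claim_equal_add_edge_to_mst_tree
  intro mst edge _dom
  unfold Spec_add_edge_to_mst_tree
  unfold add_edge_to_mst_tree add_edge_to_mst_tree_alt findCycleFast
  rw [build_eq]
  have hA := sim_dfs (buildAdjB mst).1 (buildAdjB mst).2 edge.2.1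
      (2 * mst.length + 2) edge.1 [] PySem.Set.empty
  rcases hs : searchB (buildAdjB mst).1 (buildAdjB mst).2 edge.2.1
      (2 * mst.length + 2) edge.1 PySem.Set.empty with ⟨o, vs⟩
  rw [hs] at hA
  simp only [liftPath, List.nil_append] at hA
  simp only [hs, hA]
  cases o with
  | none => simp
  | some p =>
    simp only [Option.map_some]
    rcases p with _ | ⟨e0, t⟩
    · -- empty path: u == v; A keeps the tree because the new edge is the single max edge
      simp [pyMaxInt]
    · exact post_eq mst edge e0 t
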